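-- pv_equiv track=rewrite | github.com/adrianjunus/NOAA_Time_Series_Analysis | Twista.py | clean_up_rank
-- ===== SOURCE A (Python) =====
-- def clean_up_rank(ranking):
--     """
--     Converts a ranking (list of lists) to a list of lists of
--     [max metric of a ranking, rank]
--     """
--
--
--     # Traverse the rank (in this case "rough_new_rank") backwards, finds the
--     # first storm ranking using this method to find the max metric value
--     # of a rank, and puts this in the list decribed in the docstring
--     used_ranks = set()
--     clean_ranking = []
--
--     for i in range(-1,-len(ranking),-1):
--         if ranking[i][1] not in used_ranks:
--             used_ranks = set([ranking[i][1]]) | used_ranks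
--             clean_ranking.append(ranking[i])
--
--     clean_ranking.sort()
--     return clean_ranking
-- ===== SOURCE B (Python) =====
-- def clean_up_rank(ranking):
--     """
--     Converts a ranking (list of lists) to a list of lists of
--     [max metric of a ranking, rank]
--     """
--     # Forward pass over ranking[1:]: keep, per rank value, the last entry
--     # (== A's first-seen while scanning backwards), then sort.
--     best = {}
--     for entry in ranking[1:]:
--         best[entry[1]] = entry
--     return sorted(best.values())
-- ===== Notes on version B (the rewrite author's own statement) =====
-- stated objective: idiomatic
-- what changed: Replaces the backward index loop with a seen-set and membership branch by a single forward pass over ranking[1:] that builds a dict keyed by rank value (last occurrence wins, equal to A's first-seen-backward), then sorts the dict values.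
import Mathlib
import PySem

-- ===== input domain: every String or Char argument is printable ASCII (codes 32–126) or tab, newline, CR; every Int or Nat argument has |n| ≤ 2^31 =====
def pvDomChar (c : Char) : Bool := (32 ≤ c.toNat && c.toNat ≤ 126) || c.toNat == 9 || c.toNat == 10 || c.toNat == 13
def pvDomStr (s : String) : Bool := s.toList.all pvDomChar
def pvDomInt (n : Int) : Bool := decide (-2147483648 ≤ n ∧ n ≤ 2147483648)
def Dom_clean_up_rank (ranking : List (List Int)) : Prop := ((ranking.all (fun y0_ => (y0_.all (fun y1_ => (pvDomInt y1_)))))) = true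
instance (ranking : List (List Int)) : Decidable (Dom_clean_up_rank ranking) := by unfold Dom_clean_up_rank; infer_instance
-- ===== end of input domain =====

-- B replaces A's backward scan with a seen-set by a forward pass building a dict keyed by rank
-- (last occurrence wins), then sorts the dict values — same return value, more idiomatic.


-- ===== PORT A =====
-- loop body of A: 'if ranking[i][1] not in used_ranks: used_ranks = set([ranking[i][1]]) | used_ranks; clean_ranking.append(ranking[i])'
def pvAStep (st : PySem.Set Int × List (List Int)) (e : List Int) :
    PySem.Set Int × List (List Int) :=
  if PySem.Set.contains st.1 (PySem.List.pyGetD e 1 0) then st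
  else (PySem.Set.union (PySem.Set.ofList [PySem.List.pyGetD e 1 0]) st.1, st.2 ++ [e])

def clean_up_rank (ranking : List (List Int)) : List (List Int) :=
  -- for i in range(-1, -len(ranking), -1): … ranking[i] …  (pyGetD is total: Pre_ keeps it in range)
  let st := (PySem.List.pyRange (-1) (-(ranking.length : Int)) (-1)).foldl
      (fun st i => pvAStep st (PySem.List.pyGetD ranking i [])) (PySem.Set.empty, [])
  PySem.List.sorted st.2 (fun x => x)

-- ===== PORT B =====
def clean_up_rank_alt (ranking : List (List Int)) : List (List Int) :=
  -- for entry in ranking[1:]: best[entry[1]] = entry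
  let best := (PySem.List.slice ranking (some 1) none).foldl
      (fun (d : PySem.Dict Int (List Int)) e => d.insert (PySem.List.pyGetD e 1 0) e)
      PySem.Dict.empty
  PySem.List.sorted best.values (fun x => x)

-- ===== PRECONDITION & SPEC =====
-- Pre_ excludes exactly the inputs where Python A raises IndexError: some entry after the
-- first has fewer than 2 elements (ranking[i][1] with i over positions 1..len-1).
def Pre_clean_up_rank (ranking : List (List Int)) : Prop :=
  ∀ e ∈ ranking.tail, 2 ≤ e.length
instance (ranking : List (List Int)) : Decidable (Pre_clean_up_rank ranking) := by
  unfold Pre_clean_up_rank; infer_instance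

def pvWitness_clean_up_rank : List (List Int) := [[0, 0], [7, 2], [3, 2], [5, 1]]

def Spec_clean_up_rank (ranking : List (List Int)) (out : List (List Int)) : Prop := out = clean_up_rank_alt ranking
instance (ranking : List (List Int)) (out : List (List Int)) : Decidable (Spec_clean_up_rank ranking out) := by unfold Spec_clean_up_rank; infer_instance

-- ===== CLAIM (what is proved, stated in full; the proofs are below) =====
def Claim_equal_clean_up_rank : Prop := ∀ (ranking : List (List Int)), Dom_clean_up_rank ranking → Pre_clean_up_rank ranking → Spec_clean_up_rank ranking (clean_up_rank ranking)

-- ===== LEMMAS AND PROOFS =====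

-- the rank of an entry, as both ports read it
def pvKey (e : List Int) : Int := PySem.List.pyGetD e 1 0

-- A's loop, abstracted: keep first-seen entry per key while scanning l, seen keys tracked by membership in s
def pvDedupK (s : List Int) : List (List Int) → List (List Int)
  | [] => []
  | e :: l => if pvKey e ∈ s then pvDedupK s l else e :: pvDedupK (pvKey e :: s) l

-- last entry of l whose key is k
def pvLastK (l : List (List Int)) (k : Int) : Option (List Int) :=
  l.reverse.find? (fun e => pvKey e == k)

def pvG (l : List (List Int)) (k : Int) : List Int := (pvLastK l k).getD []

theorem pvDedupK_congr (s s' : List Int) (h : ∀ k, k ∈ s ↔ k ∈ s') (l : List (List Int)) :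
    pvDedupK s l = pvDedupK s' l := by
  induction l generalizing s s' with
  | nil => rfl
  | cons e l ih =>
    simp only [pvDedupK]
    by_cases hm : pvKey e ∈ s
    · rw [if_pos hm, if_pos ((h _).mp hm)]; exact ih s s' h
    · rw [if_neg hm, if_neg (fun hc => hm ((h _).mpr hc))]
      exact congrArg _ (ih _ _ (fun k => by simp [h k]))

theorem pvFoldA (l : List (List Int)) (s : PySem.Set Int) (acc : List (List Int)) :
    (l.foldl pvAStep (s, acc)).2 = acc ++ pvDedupK s l := by
  induction l generalizing s acc with
  | nil => simp [pvDedupK]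
  | cons e l ih =>
    simp only [List.foldl_cons, pvAStep, pvDedupK, pvKey]
    by_cases hm : PySem.List.pyGetD e 1 0 ∈ s
    · rw [if_pos ((PySem.Set.contains_iff s _).mpr hm), if_pos hm, ih]
    · rw [if_neg (fun hc => hm ((PySem.Set.contains_iff s _).mp hc)), if_neg hm, ih]
      rw [pvDedupK_congr _ (PySem.List.pyGetD e 1 0 :: s)
            (fun k => by simp [PySem.Set.mem_union, PySem.Set.mem_ofList, or_comm])]
      simp

theorem pvDedupK_key_mem (l : List (List Int)) (s : List Int) (k : Int) :
    k ∈ (pvDedupK s l).map pvKey ↔ k ∈ l.map pvKey ∧ k ∉ s := by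
  induction l generalizing s with
  | nil => simp [pvDedupK]
  | cons e l ih =>
    simp only [pvDedupK]
    by_cases hm : pvKey e ∈ s
    · rw [if_pos hm, ih]
      simp only [List.map_cons, List.mem_cons]
      constructor
      · rintro ⟨h1, h2⟩; exact ⟨Or.inr h1, h2⟩
      · rintro ⟨h1 | h1, h2⟩
        · exact absurd (h1 ▸ hm) h2
        · exact ⟨h1, h2⟩
    · rw [if_neg hm]
      simp only [List.map_cons, List.mem_cons, ih, List.mem_cons]
      constructor
      · rintro (h | ⟨h1, h2⟩)
        · exact ⟨Or.inl h, h ▸ hm⟩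
        · exact ⟨Or.inr h1, fun hc => h2 (Or.inr hc)⟩
      · rintro ⟨h1 | h1, h2⟩
        · exact Or.inl h1
        · by_cases he : k = pvKey e
          · exact Or.inl he
          · exact Or.inr ⟨h1, fun hc => hc.elim (fun h => he h) h2⟩

theorem pvDedupK_nodup (l : List (List Int)) (s : List Int) :
    ((pvDedupK s l).map pvKey).Nodup := by
  induction l generalizing s with
  | nil => simp [pvDedupK]
  | cons e l ih =>
    simp only [pvDedupK]
    by_cases hm : pvKey e ∈ s
    · rw [if_pos hm]; exact ih s
    · rw [if_neg hm]
      simp only [List.map_cons, List.nodup_cons]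
      refine ⟨fun hc => ?_, ih _⟩
      exact ((pvDedupK_key_mem _ _ _).mp hc).2 (List.mem_cons_self)

theorem pvDedupK_find (l : List (List Int)) (s : List Int) (e : List Int)
    (he : e ∈ pvDedupK s l) : l.find? (fun x => pvKey x == pvKey e) = some e := by
  induction l generalizing s with
  | nil => simp [pvDedupK] at he
  | cons e' l ih =>
    simp only [pvDedupK] at he
    by_cases hm : pvKey e' ∈ s
    · rw [if_pos hm] at he
      have hne : pvKey e ≠ pvKey e' := by
        have := (pvDedupK_key_mem l s (pvKey e)).mp (List.mem_map_of_mem he)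
        exact fun hc => this.2 (hc ▸ hm)
      rw [List.find?_cons_of_neg (by simpa using hne.symm)]
      exact ih s he
    · rw [if_neg hm] at he
      rcases List.mem_cons.mp he with rfl | he'
      · exact List.find?_cons_of_pos (by simp)
      · have hne : pvKey e ≠ pvKey e' := by
          have := (pvDedupK_key_mem l (pvKey e' :: s) (pvKey e)).mp (List.mem_map_of_mem he')
          exact fun hc => this.2 (by simp [hc])
        rw [List.find?_cons_of_neg (by simpa using hne.symm)]
        exact ih _ he'

-- the indices A visits address exactly ranking.tail, back to front
theorem pvRangeMap (ranking : List (List Int)) :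
    (PySem.List.pyRange (-1) (-(ranking.length : Int)) (-1)).map
      (fun i => PySem.List.pyGetD ranking i []) = ranking.tail.reverse := by
  rw [PySem.List.pyRange_neg_one, List.map_map]
  have hlen : ((-1 : Int) - -(ranking.length : Int)).toNat = ranking.length - 1 := by omega
  rw [hlen]
  apply List.ext_getElem
  · simp
  · intro j h1 h2
    simp only [List.getElem_map, List.getElem_range, Function.comp_apply]
    have hj : j < ranking.length - 1 := by simpa using h1
    have hcast : (-1 : Int) - (j : Int) = -((j + 1 : Nat) : Int) := by push_cast; ring
    rw [hcast, PySem.List.pyGetD_neg_natCast ranking (j + 1) [] (by omega) (by omega)]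
    rw [List.getElem_reverse, List.getElem_tail]
    have hidx : ranking.length - (j + 1) = ranking.tail.length - 1 - j + 1 := by
      simp only [List.length_tail]; omega
    simp only [hidx]

-- B's dict lookup after the fold: the last entry of l with that key, else the old value
theorem pvFoldB_getD (l : List (List Int)) (d : PySem.Dict Int (List Int)) (k : Int) :
    (l.foldl (fun (d : PySem.Dict Int (List Int)) e =>
        d.insert (PySem.List.pyGetD e 1 0) e) d).getD k []
      = (pvLastK l k).getD (d.getD k []) := by
  induction l generalizing d with
  | nil => simp [pvLastK]
  | cons e l ih =>
    simp only [List.foldl_cons, ih, pvLastK, List.reverse_cons, List.find?_append]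
    rcases hf : l.reverse.find? (fun x => pvKey x == k) with _ | x
    · rw [Option.none_or, List.find?_singleton, PySem.Dict.getD_insert]
      by_cases hk : k = PySem.List.pyGetD e 1 0
      · simp [pvKey, hk]
      · simp [pvKey, hk, Ne.symm hk]
    · rw [Option.some_or]
      simp

theorem pvFoldB_keys (l : List (List Int)) :
    (l.foldl (fun (d : PySem.Dict Int (List Int)) e =>
        d.insert (PySem.List.pyGetD e 1 0) e) PySem.Dict.empty).keys
      = PySem.Set.ofList (l.map pvKey) := by
  rw [PySem.Dict.keys_foldl_insert_key l (fun e => PySem.List.pyGetD e 1 0) (fun _ e => e)]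
  rw [PySem.Dict.keys_empty, PySem.Set.update_nil_left]
  rfl

-- every kept entry is the last occurrence of its key in ranking.tail
theorem pvA_entries (t : List (List Int)) (e : List Int)
    (he : e ∈ pvDedupK [] t.reverse) : pvG t (pvKey e) = e := by
  have := pvDedupK_find t.reverse [] e he
  simp only [pvG, pvLastK, this, Option.getD_some]

-- ===== VERDICT (by name: the statement is the Claim_ definition above) =====
theorem clean_up_rank_spec : Claim_equal_clean_up_rank := by
  intro ranking _ _
  unfold Spec_clean_up_rank
  simp only [clean_up_rank, clean_up_rank_alt, PySem.List.slice_from_one]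
  set t := ranking.tail with ht
  -- A's pre-sort list
  have hA : ((PySem.List.pyRange (-1) (-(ranking.length : Int)) (-1)).foldl
      (fun st i => pvAStep st (PySem.List.pyGetD ranking i [])) (PySem.Set.empty, [])).2
      = pvDedupK [] t.reverse := by
    rw [← List.foldl_map (f := fun i => PySem.List.pyGetD ranking i []) (g := pvAStep),
        pvRangeMap, pvFoldA]
    rfl
  rw [hA]
  -- B's dict
  set dB := (t.foldl (fun (d : PySem.Dict Int (List Int)) e =>
      d.insert (PySem.List.pyGetD e 1 0) e) PySem.Dict.empty) with hdB
  have hnodupB : dB.keys.Nodup := by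
    rw [hdB]
    exact PySem.Dict.nodup_keys_foldl_insert_key t pvKey (fun _ e => e) _ (by simp)
  have hvals : dB.values = dB.keys.map (fun k => pvG t k) := by
    rw [PySem.Dict.values_eq_map_keys dB hnodupB []]
    apply List.map_congr_left
    intro k _
    rw [hdB, pvFoldB_getD]
    simp [pvG, PySem.Dict.getD_empty]
  -- A's pre-sort list rewritten through its keys
  have hAmap : pvDedupK [] t.reverse = ((pvDedupK [] t.reverse).map pvKey).map (fun k => pvG t k) := by
    rw [List.map_map]
    conv_lhs => rw [← List.map_id (pvDedupK [] t.reverse)]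
    apply List.map_congr_left
    intro e he
    exact (pvA_entries t e he).symm
  -- the two key lists are permutations of each other
  have hperm : ((pvDedupK [] t.reverse).map pvKey).Perm dB.keys := by
    rw [hdB, pvFoldB_keys]
    rw [List.perm_ext_iff_of_nodup (pvDedupK_nodup _ _) (PySem.Set.nodup_ofList _)]
    intro k
    rw [pvDedupK_key_mem, PySem.Set.mem_ofList]
    simp
  rw [hvals, hAmap]
  have hmain := PySem.List.sorted_eq_sorted_of_perm
      (((pvDedupK [] t.reverse).map pvKey).map (fun k => pvG t k))
      (dB.keys.map (fun k => pvG t k)) (fun x : List Int => x)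
      (fun a b h => h) (hperm.map (fun k => pvG t k))
  convert hmain using 2
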